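-- pv_equiv track=rewrite | github.com/sandy0637R/Python_DSA | three_111.py | check
-- ===== SOURCE A (Python) =====
-- def check(sequence):
--     count = 0
--
--     for digit in sequence:
--         if digit == "1":
--             count += 1
--             if count == 3:
--                 return True
--         else:
--             count = 0
--
--     return False
-- ===== SOURCE B (Python) =====
-- def check(sequence):
--     return "111" in sequence
-- ===== Notes on version B (the rewrite author's own statement) =====
-- stated objective: idiomatic
-- what changed: Replaces the reset-on-mismatch counter loop with a direct substring membership test for three consecutive ones.
import Mathlib
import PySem

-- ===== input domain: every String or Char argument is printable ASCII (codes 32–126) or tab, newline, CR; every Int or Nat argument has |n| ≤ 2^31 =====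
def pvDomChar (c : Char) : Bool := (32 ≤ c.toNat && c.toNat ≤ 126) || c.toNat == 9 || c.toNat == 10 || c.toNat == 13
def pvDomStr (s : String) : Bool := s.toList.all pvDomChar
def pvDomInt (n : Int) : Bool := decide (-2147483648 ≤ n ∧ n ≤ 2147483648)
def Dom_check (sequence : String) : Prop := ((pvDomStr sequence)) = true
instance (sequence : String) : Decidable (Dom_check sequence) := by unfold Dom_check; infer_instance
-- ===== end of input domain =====

-- B replaces A's reset-on-mismatch counter loop by a substring membership test; equal on all strings.

-- ===== PORT A =====
-- loop with counter and early return, step for step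
def checkLoop : List Char → Int → Bool
  | [], _ => false
  | c :: rest, count =>
      if c = '1' then
        if count + 1 == 3 then true else checkLoop rest (count + 1)
      else
        checkLoop rest 0

def check (sequence : String) : Bool := checkLoop sequence.toList 0

-- ===== PORT B =====
def check_alt (sequence : String) : Bool := PySem.Str.isIn "111" sequence

-- ===== PRECONDITION & SPEC =====
def Spec_check (sequence : String) (out : Bool) : Prop := out = check_alt sequence
instance (sequence : String) (out : Bool) : Decidable (Spec_check sequence out) := by unfold Spec_check; infer_instance

-- ===== CLAIM (what is proved, stated in full; the proofs are below) =====
def Claim_equal_check : Prop := ∀ (sequence : String), Dom_check sequence → Spec_check sequence (check sequence)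

-- ===== LEMMAS AND PROOFS =====

-- invariant: with k ones already counted (k ≤ 2), the loop succeeds iff the
-- remaining list starts with the missing (3-k) ones, or contains "111" somewhere
theorem checkLoop_iff (l : List Char) (k : Nat) (hk : k ≤ 2) :
    checkLoop l (k : Int) = true ↔
      (List.replicate (3 - k) '1' <+: l ∨ ['1', '1', '1'] <:+: l) := by
  induction l generalizing k with
  | nil =>
      simp only [checkLoop, List.prefix_nil, List.infix_nil, Bool.false_eq_true, false_iff]
      rintro (h | h)
      · have := congrArg List.length h
        simp at this; omega
      · simp at h
  | cons c rest ih =>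
      by_cases hc : c = '1'
      · subst hc
        have hrep : List.replicate (3 - k) '1' = '1' :: List.replicate (2 - k) '1' := by
          rw [show 3 - k = (2 - k) + 1 from by omega, List.replicate_succ]
        have hpre : (List.replicate (3 - k) '1' <+: '1' :: rest)
            ↔ List.replicate (2 - k) '1' <+: rest := by
          rw [hrep, List.cons_prefix_cons]; simp
        have hinf : ((['1', '1', '1'] : List Char) <:+: '1' :: rest)
            ↔ (['1', '1'] <+: rest ∨ ['1', '1', '1'] <:+: rest) := by
          rw [List.infix_cons_iff, List.cons_prefix_cons]; simp
        by_cases h2 : k = 2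
        · subst h2
          simp only [checkLoop]
          norm_num
        · have step : checkLoop ('1' :: rest) (k : Int) = checkLoop rest ((k + 1 : Nat) : Int) := by
            have hne : ((k : Int) + 1 == 3) = false := by simp; omega
            simp [checkLoop, hne]
          rw [step, ih (k + 1) (by omega), hpre, hinf,
            show 3 - (k + 1) = 2 - k from by omega]
          constructor
          · rintro (h | h)
            · exact Or.inl h
            · exact Or.inr (Or.inr h)
          · rintro (h | h | h)
            · exact Or.inl h
            · refine Or.inl (List.IsPrefix.trans ?_ h)
              interval_cases k <;> simp [List.replicate]
            · exact Or.inr h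
      · have step : checkLoop (c :: rest) (k : Int) = checkLoop rest ((0 : Nat) : Int) := by
          simp [checkLoop, hc]
        have hnotpre : ¬ List.replicate (3 - k) '1' <+: c :: rest := by
          rw [show 3 - k = (2 - k) + 1 from by omega, List.replicate_succ,
            List.cons_prefix_cons]
          rintro ⟨h1, -⟩; exact hc h1.symm
        have hnotpre3 : ¬ ((['1', '1', '1'] : List Char) <+: c :: rest) := by
          rw [List.cons_prefix_cons]
          rintro ⟨h1, -⟩; exact hc h1.symm
        rw [step, ih 0 (by omega), List.infix_cons_iff]
        have h30 : List.replicate (3 - 0) '1' = (['1', '1', '1'] : List Char) := rfl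
        rw [h30]
        constructor
        · rintro (h | h)
          · exact Or.inr (Or.inr h.isInfix)
          · exact Or.inr (Or.inr h)
        · rintro (h | h | h)
          · exact absurd h hnotpre
          · exact absurd h hnotpre3
          · exact Or.inr h

-- ===== VERDICT (by name: the statement is the Claim_ definition above) =====
theorem check_spec : Claim_equal_check := by
  intro s _
  show check s = check_alt s
  have hA := checkLoop_iff s.toList 0 (by omega)
  have hB : check_alt s = true ↔ (['1', '1', '1'] : List Char) <:+: s.toList := by
    simpa using PySem.Str.isIn_iff_infix (sub := "111") (s := s)
  have key : check s = true ↔ check_alt s = true := by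
    rw [show check s = checkLoop s.toList ((0 : Nat) : Int) from rfl, hA, hB]
    constructor
    · rintro (h | h)
      · exact (show List.replicate (3 - 0) '1' = (['1','1','1'] : List Char) from rfl) ▸ h.isInfix
      · exact h
    · exact Or.inr
  rcases Bool.eq_false_or_eq_true (check s) with h | h <;>
    rcases Bool.eq_false_or_eq_true (check_alt s) with h' | h' <;> simp_all
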